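-- pv_equiv track=rewrite | github.com/Afeks214/Lorenzian-Educlidian- | src/agents/main_core/strategic_mc_dropout_migration.py | _remove_method
-- ===== SOURCE A (Python) =====
-- def _remove_method(content: str, method_name: str) -> str:
--     """Remove a specific method from the code."""
--
--     lines = content.split('\n')
--     new_lines = []
--     skip_lines = False
--     indent_level = 0
--
--     for line in lines:
--         if f"def {method_name}(" in line:
--             skip_lines = True
--             indent_level = len(line) - len(line.lstrip())
--             continue
--
--         if skip_lines:
--             current_indent = len(line) - len(line.lstrip())
--             if line.strip() and current_indent <= indent_level:
--                 skip_lines = False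
--                 new_lines.append(line)
--             # Skip lines that are part of the method
--             continue
--
--         new_lines.append(line)
--
--     return '\n'.join(new_lines)
-- ===== SOURCE B (Python) =====
-- def _remove_method(content: str, method_name: str) -> str:
--     """Remove a specific method from the code (explicit block-boundary scan)."""
--     lines = content.split('\n')
--     pat = f"def {method_name}("
--     kept = []
--     i = 0
--     n = len(lines)
--     while i < n:
--         line = lines[i]
--         if pat in line:
--             indent = len(line) - len(line.lstrip())
--             j = i + 1
--             while j < n:
--                 l = lines[j]
--                 if pat in l or (l.strip() and len(l) - len(l.lstrip()) <= indent):
--                     break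
--                 j += 1
--             i = j  # re-examine the terminating line normally
--         else:
--             kept.append(line)
--             i += 1
--     return '\n'.join(kept)
-- ===== Notes on version B (the rewrite author's own statement) =====
-- stated objective: alternative
-- what changed: Replaces A's single-pass skip-flag state machine with an explicit two-level index scan that locates each method block's end with an inner loop and resumes at the terminating line, keeping lines outside blocks directly.
import Mathlib
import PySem

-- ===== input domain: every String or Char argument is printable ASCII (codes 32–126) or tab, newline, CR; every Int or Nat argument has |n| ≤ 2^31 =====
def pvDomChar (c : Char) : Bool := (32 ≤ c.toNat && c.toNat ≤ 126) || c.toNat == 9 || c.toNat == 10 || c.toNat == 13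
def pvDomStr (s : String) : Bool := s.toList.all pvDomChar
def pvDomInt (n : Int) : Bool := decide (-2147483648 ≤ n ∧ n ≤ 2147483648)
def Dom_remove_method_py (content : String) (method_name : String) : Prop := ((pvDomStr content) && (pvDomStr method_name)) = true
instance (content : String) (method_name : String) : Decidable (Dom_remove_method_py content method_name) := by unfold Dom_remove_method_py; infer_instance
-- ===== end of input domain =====

-- B replaces A's skip-flag state machine by an explicit block-boundary scan (same O(n) cost); return values proved equal on all inputs.

-- ===== PORT A =====
-- one step of A's for-loop: state = (new_lines, skip_lines, indent_level)
def pvAStep (pat : List Char) (st : List (List Char) × Bool × Nat) (line : List Char) :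
    List (List Char) × Bool × Nat :=
  if PySem.Chars.isIn pat line then
    (st.1, true, line.length - (PySem.Chars.lstrip line).length)
  else if st.2.1 then
    (if PySem.Chars.strip line ≠ [] ∧ line.length - (PySem.Chars.lstrip line).length ≤ st.2.2 then
      (st.1 ++ [line], false, st.2.2)
    else
      (st.1, true, st.2.2))
  else
    (st.1 ++ [line], st.2.1, st.2.2)

def remove_method_py (content : String) (method_name : String) : String :=
  String.ofList (PySem.Chars.join "\n".toList
    ((PySem.Chars.splitOn content.toList "\n".toList).foldl
      (pvAStep ("def ".toList ++ method_name.toList ++ "(".toList)) ([], false, 0)).1)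

-- ===== PORT B =====
-- B's inner while-loop: drop lines until the block-terminating line (kept, re-examined by the outer loop)
def pvBSkip (pat : List Char) (indent : Nat) : List (List Char) → List (List Char)
  | [] => []
  | l :: rest =>
    if PySem.Chars.isIn pat l ∨
       (PySem.Chars.strip l ≠ [] ∧ l.length - (PySem.Chars.lstrip l).length ≤ indent) then
      l :: rest
    else
      pvBSkip pat indent rest

theorem pvBSkip_length_le (pat : List Char) (indent : Nat) (xs : List (List Char)) :
    (pvBSkip pat indent xs).length ≤ xs.length := by
  induction xs with
  | nil => simp [pvBSkip]
  | cons l rest ih =>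
    simp only [pvBSkip]
    split
    · exact Nat.le_refl _
    · exact Nat.le_succ_of_le ih

-- B's outer while-loop over the line index
def pvBGo (pat : List Char) : List (List Char) → List (List Char)
  | [] => []
  | line :: rest =>
    if PySem.Chars.isIn pat line then
      pvBGo pat (pvBSkip pat (line.length - (PySem.Chars.lstrip line).length) rest)
    else
      line :: pvBGo pat rest
termination_by xs => xs.length
decreasing_by
  · exact Nat.lt_succ_of_le (pvBSkip_length_le _ _ _)
  · simp

def remove_method_py_alt (content : String) (method_name : String) : String :=
  String.ofList (PySem.Chars.join "\n".toList
    (pvBGo ("def ".toList ++ method_name.toList ++ "(".toList)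
      (PySem.Chars.splitOn content.toList "\n".toList)))

-- ===== PRECONDITION & SPEC =====
def Spec_remove_method_py (content : String) (method_name : String) (out : String) : Prop := out = remove_method_py_alt content method_name
instance (content : String) (method_name : String) (out : String) : Decidable (Spec_remove_method_py content method_name out) := by unfold Spec_remove_method_py; infer_instance

-- ===== CLAIM (what is proved, stated in full; the proofs are below) =====
def Claim_equal_remove_method_py : Prop := ∀ (content : String) (method_name : String), Dom_remove_method_py content method_name → Spec_remove_method_py content method_name (remove_method_py content method_name)

-- ===== LEMMAS AND PROOFS =====

-- the loop invariant: A's fold, from either flag state, produces exactly B's result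
theorem pv_main (pat : List Char) (lines : List (List Char)) :
    (∀ (acc : List (List Char)) (ind : Nat),
        (lines.foldl (pvAStep pat) (acc, true, ind)).1
          = acc ++ pvBGo pat (pvBSkip pat ind lines)) ∧
    (∀ (acc : List (List Char)) (ind : Nat),
        (lines.foldl (pvAStep pat) (acc, false, ind)).1
          = acc ++ pvBGo pat lines) := by
  induction lines with
  | nil => simp [pvBGo, pvBSkip]
  | cons l rest ih =>
    constructor
    · intro acc ind
      by_cases hp : PySem.Chars.isIn pat l
      · rw [show pvBSkip pat ind (l :: rest) = l :: rest from by
            rw [pvBSkip, if_pos (Or.inl hp)]]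
        rw [show pvBGo pat (l :: rest)
              = pvBGo pat (pvBSkip pat (l.length - (PySem.Chars.lstrip l).length) rest) from by
            rw [pvBGo, if_pos hp]]
        rw [List.foldl_cons,
          show pvAStep pat (acc, true, ind) l
              = (acc, true, l.length - (PySem.Chars.lstrip l).length) from by
            simp only [pvAStep]; rw [if_pos hp]]
        exact ih.1 acc _
      · by_cases hc : PySem.Chars.strip l ≠ [] ∧ l.length - (PySem.Chars.lstrip l).length ≤ ind
        · rw [show pvBSkip pat ind (l :: rest) = l :: rest from by
              rw [pvBSkip, if_pos (Or.inr hc)]]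
          rw [show pvBGo pat (l :: rest) = l :: pvBGo pat rest from by
              rw [pvBGo, if_neg hp]]
          rw [List.foldl_cons,
            show pvAStep pat (acc, true, ind) l = (acc ++ [l], false, ind) from by
              simp only [pvAStep]; rw [if_neg hp, if_pos trivial, if_pos hc]]
          rw [ih.2 (acc ++ [l]) ind]
          simp
        · rw [show pvBSkip pat ind (l :: rest) = pvBSkip pat ind rest from by
              rw [pvBSkip, if_neg (fun h => h.elim hp hc)]]
          rw [List.foldl_cons,
            show pvAStep pat (acc, true, ind) l = (acc, true, ind) from by
              simp only [pvAStep]; rw [if_neg hp, if_pos trivial, if_neg hc]]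
          exact ih.1 acc ind
    · intro acc ind
      by_cases hp : PySem.Chars.isIn pat l
      · rw [show pvBGo pat (l :: rest)
              = pvBGo pat (pvBSkip pat (l.length - (PySem.Chars.lstrip l).length) rest) from by
            rw [pvBGo, if_pos hp]]
        rw [List.foldl_cons,
          show pvAStep pat (acc, false, ind) l
              = (acc, true, l.length - (PySem.Chars.lstrip l).length) from by
            simp only [pvAStep]; rw [if_pos hp]]
        exact ih.1 acc _
      · rw [show pvBGo pat (l :: rest) = l :: pvBGo pat rest from by
            rw [pvBGo, if_neg hp]]
        rw [List.foldl_cons,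
          show pvAStep pat (acc, false, ind) l = (acc ++ [l], false, ind) from by
            simp only [pvAStep]; rw [if_neg hp, if_neg Bool.false_ne_true]]
        rw [ih.2 (acc ++ [l]) ind]
        simp

-- ===== VERDICT (by name: the statement is the Claim_ definition above) =====
theorem remove_method_py_spec : Claim_equal_remove_method_py := by
  intro content method_name _
  unfold Spec_remove_method_py remove_method_py remove_method_py_alt
  rw [(pv_main _ _).2 [] 0, List.nil_append]
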